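-- pv_equiv track=rewrite | github.com/gtkrshnaaa/paicode | paicode/agent.py | _summarize_exec_result
-- ===== SOURCE A (Python) =====
-- def _summarize_exec_result(text: str, max_lines_per_section: int = 40) -> str:
--     """Trim very long STDOUT/STDERR sections for summary display (streaming already shows full)."""
--     try:
--         lines = text.splitlines()
--         def _trim_section(start_idx: int) -> None:
--             # Trim lines after header line
--             count = 0
--             i = start_idx + 1
--             while i < len(lines) and not lines[i].startswith("STDERR:") and not lines[i].startswith("STDOUT:"):
--                 count += 1
--                 i += 1
--             if count > max_lines_per_section:
--                 # Keep header + first N lines and add ellipsis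
--                 kept = lines[start_idx + 1:start_idx + 1 + max_lines_per_section]
--                 del lines[start_idx + 1:start_idx + 1 + count]
--                 lines[start_idx + 1:start_idx + 1] = kept + ["... (truncated) ..."]
--
--         # Find sections and trim
--         idx = 0
--         while idx < len(lines):
--             if lines[idx].startswith("STDOUT:"):
--                 _trim_section(idx)
--             elif lines[idx].startswith("STDERR:"):
--                 _trim_section(idx)
--             idx += 1
--         return "\n".join(lines)
--     except Exception:
--         return text
-- ===== SOURCE B (Python) =====
-- def _summarize_exec_result(text: str, max_lines_per_section: int = 40) -> str:
--     """Single forward pass: build a new list of lines instead of mutating in place."""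
--     lines = text.splitlines()
--     out = []
--     i = 0
--     n = len(lines)
--     while i < n:
--         line = lines[i]
--         out.append(line)
--         i += 1
--         if line.startswith("STDOUT:") or line.startswith("STDERR:"):
--             body = []
--             while i < n and not lines[i].startswith("STDOUT:") and not lines[i].startswith("STDERR:"):
--                 body.append(lines[i])
--                 i += 1
--             if len(body) > max_lines_per_section:
--                 out.extend(body[:max_lines_per_section])
--                 out.append("... (truncated) ...")
--             else:
--                 out.extend(body)
--     return "\n".join(out)
-- ===== Notes on version B (the rewrite author's own statement) =====
-- stated objective: simpler
-- what changed: A repeatedly mutates the line list in place (count scan, del slice, slice re-insertion) under an index loop that then re-walks the lines it just inserted; B is one forward pass that builds a fresh output list, copying each line and, at a header, splitting off the section body and appending it truncated.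
import Mathlib
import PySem

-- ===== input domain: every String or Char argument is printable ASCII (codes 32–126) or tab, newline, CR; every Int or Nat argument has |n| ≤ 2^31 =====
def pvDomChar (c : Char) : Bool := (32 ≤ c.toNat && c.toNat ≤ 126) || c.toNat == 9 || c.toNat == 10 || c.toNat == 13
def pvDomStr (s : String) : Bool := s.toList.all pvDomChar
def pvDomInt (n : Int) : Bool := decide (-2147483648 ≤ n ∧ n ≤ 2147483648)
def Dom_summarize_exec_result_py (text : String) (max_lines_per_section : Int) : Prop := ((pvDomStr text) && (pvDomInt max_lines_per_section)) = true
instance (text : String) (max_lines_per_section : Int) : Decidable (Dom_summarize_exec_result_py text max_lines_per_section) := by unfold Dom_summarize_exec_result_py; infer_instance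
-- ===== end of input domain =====

-- B replaces A's in-place section surgery (del + slice re-insertion under a mutating index loop)
-- with a single forward pass that builds a fresh output list; objective: simpler.

-- ===== PORT A =====
-- inner while loop of _trim_section: counts non-header lines from index i on
def pvCountA (lines : List String) (i : Nat) : Nat :=
  if h : i < lines.length then
    if !PySem.Str.startswith lines[i] "STDERR:" && !PySem.Str.startswith lines[i] "STDOUT:" then
      pvCountA lines (i + 1) + 1
    else 0
  else 0
termination_by lines.length - i

-- _trim_section: returns the mutated `lines` (Python mutates in place; kept/del/insert are
-- Python slice operations, ported with PySem.List.slice, exact including negative bounds)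
def pvTrimA (M : Int) (lines : List String) (s : Nat) : List String :=
  let count := pvCountA lines (s + 1)
  if (count : Int) > M then
    let kept := PySem.List.slice lines (some ((s : Int) + 1)) (some ((s : Int) + 1 + M))
    -- del lines[s+1 : s+1+count]
    let l1 := PySem.List.slice lines none (some ((s : Int) + 1)) ++
              PySem.List.slice lines (some ((s : Int) + 1 + (count : Int))) none
    -- lines[s+1 : s+1] = kept + ["... (truncated) ..."]
    PySem.List.slice l1 none (some ((s : Int) + 1)) ++ (kept ++ ["... (truncated) ..."]) ++
      PySem.List.slice l1 (some ((s : Int) + 1)) none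
  else lines

-- outer while loop; fuel strictly exceeds the number of iterations on every input admitted by
-- Pre_ (for 0 ≤ M the list never grows, proved below), with quadratic slack beyond that
def pvLoopA (M : Int) : Nat → List String → Nat → List String
  | 0, lines, _ => lines
  | fuel + 1, lines, idx =>
    if h : idx < lines.length then
      if PySem.Str.startswith lines[idx] "STDOUT:" then
        pvLoopA M fuel (pvTrimA M lines idx) (idx + 1)
      else if PySem.Str.startswith lines[idx] "STDERR:" then
        pvLoopA M fuel (pvTrimA M lines idx) (idx + 1)
      else
        pvLoopA M fuel lines (idx + 1)
    else lines

def summarize_exec_result_py (text : String) (max_lines_per_section : Int) : String :=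
  let lines := PySem.Str.splitlines text
  PySem.Str.join "\n" (pvLoopA max_lines_per_section ((lines.length + 1) * (lines.length + 1)) lines 0)

-- ===== PORT B =====
def pvIsHeader (l : String) : Bool :=
  PySem.Str.startswith l "STDOUT:" || PySem.Str.startswith l "STDERR:"

-- the single forward pass of Source B: copy a non-header line; at a header collect the body
-- (inner while = takeWhile/dropWhile split), truncate it if too long, and continue after it
def pvGoB (M : Int) : List String → List String
  | [] => []
  | x :: xs =>
    if pvIsHeader x then
      let body := xs.takeWhile (fun l => !pvIsHeader l)
      let rest := xs.dropWhile (fun l => !pvIsHeader l)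
      x :: ((if (body.length : Int) > M then
               PySem.List.slice body none (some M) ++ ["... (truncated) ..."]
             else body) ++ pvGoB M rest)
    else x :: pvGoB M xs
termination_by l => l.length
decreasing_by
  · simpa using Nat.lt_succ_of_le (List.length_dropWhile_le _ _)
  · simp

def summarize_exec_result_py_alt (text : String) (max_lines_per_section : Int) : String :=
  PySem.Str.join "\n" (pvGoB max_lines_per_section (PySem.Str.splitlines text))

-- ===== PRECONDITION & SPEC =====
-- Pre_ excludes a negative max_lines_per_section (outside the natural domain of a keep-count)
-- when the text actually contains a header line: there A's kept slice lines[s+1 : s+1+max]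
-- wraps/empties by Python negative-slice arithmetic while B's body[:max] drops the tail,
-- two equally accidental values nobody would specify; header-free texts are always claimed.
def Pre_summarize_exec_result_py (text : String) (max_lines_per_section : Int) : Prop :=
  0 ≤ max_lines_per_section ∨
    (PySem.Str.splitlines text).all (fun l => !pvIsHeader l) = true
instance (text : String) (max_lines_per_section : Int) : Decidable (Pre_summarize_exec_result_py text max_lines_per_section) := by unfold Pre_summarize_exec_result_py; infer_instance

def pvWitness_summarize_exec_result_py : String × Int := ("STDOUT:\na\nb\nc", 2)

def Spec_summarize_exec_result_py (text : String) (max_lines_per_section : Int) (out : String) : Prop := out = summarize_exec_result_py_alt text max_lines_per_section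
instance (text : String) (max_lines_per_section : Int) (out : String) : Decidable (Spec_summarize_exec_result_py text max_lines_per_section out) := by unfold Spec_summarize_exec_result_py; infer_instance

-- ===== CLAIM (what is proved, stated in full; the proofs are below) =====
def Claim_equal_summarize_exec_result_py : Prop := ∀ (text : String) (max_lines_per_section : Int), Dom_summarize_exec_result_py text max_lines_per_section → Pre_summarize_exec_result_py text max_lines_per_section → Spec_summarize_exec_result_py text max_lines_per_section (summarize_exec_result_py text max_lines_per_section)

-- ===== LEMMAS AND PROOFS =====

-- A's inner count is the length of the non-header prefix from index i
lemma pvCountA_eq (lines : List String) (i : Nat) :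
    pvCountA lines i = ((lines.drop i).takeWhile (fun l => !pvIsHeader l)).length := by
  unfold pvCountA
  split
  · next h =>
    rw [List.drop_eq_getElem_cons h, List.takeWhile_cons]
    have : (!pvIsHeader lines[i]) =
        (!PySem.Str.startswith lines[i] "STDERR:" && !PySem.Str.startswith lines[i] "STDOUT:") := by
      unfold pvIsHeader
      cases PySem.Str.startswith lines[i] "STDOUT:" <;> cases PySem.Str.startswith lines[i] "STDERR:" <;> rfl
    rw [← this]
    cases hb : (!pvIsHeader lines[i])
    · simp
    · simpa using pvCountA_eq lines (i + 1)
  · next h =>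
    rw [List.drop_eq_nil_of_le (by omega)]
    simp
termination_by lines.length - i

-- non-header lines pass through B's scan untouched
lemma pvGoB_pass (M : Int) (pre rest : List String)
    (h : ∀ y ∈ pre, pvIsHeader y = false) :
    pvGoB M (pre ++ rest) = pre ++ pvGoB M rest := by
  induction pre with
  | nil => simp
  | cons y ys ih =>
    have hy : pvIsHeader y = false := h y (by simp)
    rw [List.cons_append, pvGoB, hy]
    simp only [Bool.false_eq_true, if_false]
    rw [ih (fun z hz => h z (by simp [hz]))]
    simp

-- with no header line the trimming loop of A is a no-op
lemma pvLoopA_noop (M : Int) (lines : List String)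
    (h : ∀ y ∈ lines, pvIsHeader y = false) :
    ∀ (fuel : Nat) (idx : Nat), pvLoopA M fuel lines idx = lines := by
  intro fuel
  induction fuel with
  | zero => intro idx; rw [pvLoopA]
  | succ fuel ih =>
    intro idx
    rw [pvLoopA]
    split
    · next hlt =>
      have hy := h lines[idx] (lines.getElem_mem hlt)
      unfold pvIsHeader at hy
      rcases Bool.or_eq_false_iff.mp hy with ⟨h1, h2⟩
      rw [h2, h1]
      simpa using ih (idx + 1)
    · rfl

-- with no header line B's pass copies every line
lemma pvGoB_noop (M : Int) (lines : List String)
    (h : ∀ y ∈ lines, pvIsHeader y = false) :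
    pvGoB M lines = lines := by
  have := pvGoB_pass M lines [] h
  simpa [pvGoB] using this

-- main simulation: A's mutating loop from index idx equals (untouched prefix) ++ B's pass
lemma pvLoopA_eq (M : Int) (hM : 0 ≤ M) :
    ∀ (fuel : Nat) (lines : List String) (idx : Nat), lines.length ≤ idx + fuel →
      pvLoopA M fuel lines idx = lines.take idx ++ pvGoB M (lines.drop idx) := by
  intro fuel
  induction fuel with
  | zero =>
    intro lines idx hle
    rw [pvLoopA, List.drop_eq_nil_of_le (by omega), List.take_of_length_le (by omega)]
    simp [pvGoB]
  | succ fuel ih =>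
    intro lines idx hle
    rw [pvLoopA]
    split
    · next h =>
      have hdrop : lines.drop idx = lines[idx] :: lines.drop (idx + 1) := List.drop_eq_getElem_cons h
      have htake1 : lines.take (idx + 1) = lines.take idx ++ [lines[idx]] := by
        rw [List.take_add_one, List.getElem?_eq_getElem h]; rfl
      have hsplit : (lines.drop (idx + 1)).takeWhile (fun l => !pvIsHeader l) ++
          (lines.drop (idx + 1)).dropWhile (fun l => !pvIsHeader l) = lines.drop (idx + 1) :=
        List.takeWhile_append_dropWhile
      set body := (lines.drop (idx + 1)).takeWhile (fun l => !pvIsHeader l) with hbody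
      set rest := (lines.drop (idx + 1)).dropWhile (fun l => !pvIsHeader l) with hrest
      have hbodyn : ∀ y ∈ body, pvIsHeader y = false := by
        intro y hy
        have := List.mem_takeWhile_imp hy
        simpa using this
      have hcount : pvCountA lines (idx + 1) = body.length := by rw [pvCountA_eq]
      have hlen : lines.length = idx + 1 + body.length + rest.length := by
        have h1 : (lines.drop (idx + 1)).length = lines.length - (idx + 1) := List.length_drop
        have h2 : (body ++ rest).length = (lines.drop (idx + 1)).length := by rw [hsplit]
        simp only [List.length_append] at h2
        omega
      have hstep : (if PySem.Str.startswith lines[idx] "STDOUT:" then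
            pvLoopA M fuel (pvTrimA M lines idx) (idx + 1)
          else if PySem.Str.startswith lines[idx] "STDERR:" then
            pvLoopA M fuel (pvTrimA M lines idx) (idx + 1)
          else pvLoopA M fuel lines (idx + 1)) =
          if pvIsHeader lines[idx] then pvLoopA M fuel (pvTrimA M lines idx) (idx + 1)
          else pvLoopA M fuel lines (idx + 1) := by
        unfold pvIsHeader
        cases PySem.Str.startswith lines[idx] "STDOUT:" <;>
          cases PySem.Str.startswith lines[idx] "STDERR:" <;> simp
      rw [hstep]
      by_cases hhdr : pvIsHeader lines[idx] = true
      · rw [if_pos hhdr]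
        by_cases hgt : (body.length : Int) > M
        · -- truncation fires
          have hMlt : M.toNat < body.length := by omega
          have htrim : pvTrimA M lines idx =
              lines.take (idx + 1) ++ ((body.take M.toNat ++ ["... (truncated) ..."]) ++ rest) := by
            unfold pvTrimA
            simp only [hcount]
            rw [if_pos (by exact_mod_cast hgt)]
            have e1 : ((idx : Int) + 1) = ((idx + 1 : Nat) : Int) := by push_cast; ring
            have e2 : ((idx : Int) + 1 + M) = (((idx + 1 : Nat) : Int) + ((M.toNat : Nat) : Int)) := by
              push_cast; omega
            have e3 : ((idx : Int) + 1 + (body.length : Int)) = ((idx + 1 + body.length : Nat) : Int) := by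
              push_cast; ring
            rw [e2, e3, e1, PySem.List.slice_natCast_add, PySem.List.slice_to_natCast,
              PySem.List.slice_from_natCast]
            have hkept : (lines.drop (idx + 1)).take M.toNat = body.take M.toNat := by
              conv_lhs => rw [← hsplit]
              exact List.take_append_of_le_length (by omega)
            have hdel : lines.drop (idx + 1 + body.length) = rest := by
              rw [← List.drop_drop, ← hsplit]
              exact List.drop_left
            rw [hkept, hdel]
            have hlt : (lines.take (idx + 1)).length = idx + 1 := by
              rw [List.length_take]; omega
            rw [PySem.List.slice_to_natCast, PySem.List.slice_from_natCast,
              List.take_left' hlt, List.drop_left' hlt]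
            simp [List.append_assoc]
          rw [htrim]
          have hlen' : (lines.take (idx + 1) ++ ((body.take M.toNat ++ ["... (truncated) ..."]) ++ rest)).length
              ≤ idx + 1 + fuel := by
            simp only [List.length_append, List.length_take, List.length_cons, List.length_nil]
            have : (body.take M.toNat).length = M.toNat := by
              rw [List.length_take]; omega
            omega
          rw [ih _ _ hlen']
          have hlt : (lines.take (idx + 1)).length = idx + 1 := by rw [List.length_take]; omega
          rw [List.take_left' hlt, List.drop_left' hlt]
          have hpass : pvGoB M ((body.take M.toNat ++ ["... (truncated) ..."]) ++ rest) =
              (body.take M.toNat ++ ["... (truncated) ..."]) ++ pvGoB M rest := by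
            apply pvGoB_pass
            intro y hy
            rcases List.mem_append.mp hy with hy | hy
            · exact hbodyn y (List.mem_of_mem_take hy)
            · simp only [List.mem_singleton] at hy
              subst hy; decide
          rw [hpass, hdrop]
          rw [pvGoB]
          simp only [hhdr, if_true]
          rw [if_pos hgt, PySem.List.slice_to _ hM, ← hbody, ← hrest, htake1,
            List.append_assoc, List.singleton_append]
        · -- section short enough: trim is the identity
          have htrim : pvTrimA M lines idx = lines := by
            unfold pvTrimA
            simp only [hcount]
            rw [if_neg (by exact_mod_cast hgt)]
          rw [htrim, ih _ _ (by omega), hdrop]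
          rw [pvGoB]
          simp only [hhdr, if_true]
          rw [if_neg hgt]
          conv_lhs => rw [← hsplit]
          rw [pvGoB_pass M body rest hbodyn, ← hbody, ← hrest, htake1,
            List.append_assoc, List.singleton_append]
      · -- not a header: plain advance
        rw [if_neg hhdr, ih _ _ (by omega), hdrop]
        rw [pvGoB]
        rw [if_neg hhdr, htake1, List.append_assoc, List.singleton_append]
    · next h =>
      rw [List.drop_eq_nil_of_le (by omega), List.take_of_length_le (by omega)]
      simp [pvGoB]

-- ===== VERDICT (by name: the statement is the Claim_ definition above) =====
theorem summarize_exec_result_py_spec : Claim_equal_summarize_exec_result_py := by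
  intro text M _dom hPre
  unfold Spec_summarize_exec_result_py summarize_exec_result_py summarize_exec_result_py_alt
  rcases hPre with hM | hNoHdr
  case inr =>
    have h : ∀ y ∈ PySem.Str.splitlines text, pvIsHeader y = false := by
      intro y hy
      simpa using List.all_eq_true.mp hNoHdr y hy
    show PySem.Str.join "\n" (pvLoopA M _ (PySem.Str.splitlines text) 0) = _
    rw [pvLoopA_noop M _ h, pvGoB_noop M _ h]
  case inl =>
  have hM := hM
  have h := pvLoopA_eq M hM ((((PySem.Str.splitlines text).length + 1) * ((PySem.Str.splitlines text).length + 1))) (PySem.Str.splitlines text) 0 (by nlinarith [(PySem.Str.splitlines text).length.zero_le])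
  simp only [List.take_zero, List.drop_zero, List.nil_append] at h
  simp [h]
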